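-- pv_equiv track=rewrite | github.com/phamduyphat/competitive-programming | giaithua.py | finding_zero
-- ===== SOURCE A (Python) =====
-- def factorization(base):
--     res = []
--     i = 2
--     while i * i <= base:
--         if base % i == 0:
--             base = base // i
--             res.append(i)
--         else:
--             i += 1
--     if base > 1:
--         res.append(base)
--     return res
--
-- def finding_zero(input, base):
--     factors = factorization(base)
--     data = {}
--     for factor in set(factors):
--         temp = input
--         res = 0
--         while temp:
--             temp = temp // factor
--             res += temp
--         data[factor] = res
--     return min([data[factor] // factors.count(factor) for factor in set(factors)])
-- ===== SOURCE B (Python) =====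
-- def factorization(base):
--     res = []
--     i = 2
--     while i * i <= base:
--         if base % i == 0:
--             base = base // i
--             res.append(i)
--         else:
--             i += 1
--     if base > 1:
--         res.append(base)
--     return res
--
-- def finding_zero(input, base):
--     # count prime multiplicities once (no repeated list.count scans)
--     counts = {}
--     for p in factorization(base):
--         counts[p] = counts.get(p, 0) + 1
--     best = None
--     for p, m in counts.items():
--         # exponent of p in input! by Legendre's closed form (base-p digit sum)
--         n = input
--         s = 0
--         while n:
--             s += n % p
--             n //= p
--         v = ((input - s) // (p - 1)) // m
--         if best is None or v < best:
--             best = v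
--     if best is None:
--         raise ValueError("min() arg is an empty sequence")
--     return best
-- ===== Notes on version B (the rewrite author's own statement) =====
-- stated objective: alternative
-- what changed: finding_zero now builds a multiplicity dict in one pass (instead of set() plus repeated list.count scans) and computes each prime's exponent in input! by Legendre's closed form (input minus base-p digit sum, divided by p-1) with a running minimum, instead of summing successive floor divisions and taking min of a comprehension.
import Mathlib
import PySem

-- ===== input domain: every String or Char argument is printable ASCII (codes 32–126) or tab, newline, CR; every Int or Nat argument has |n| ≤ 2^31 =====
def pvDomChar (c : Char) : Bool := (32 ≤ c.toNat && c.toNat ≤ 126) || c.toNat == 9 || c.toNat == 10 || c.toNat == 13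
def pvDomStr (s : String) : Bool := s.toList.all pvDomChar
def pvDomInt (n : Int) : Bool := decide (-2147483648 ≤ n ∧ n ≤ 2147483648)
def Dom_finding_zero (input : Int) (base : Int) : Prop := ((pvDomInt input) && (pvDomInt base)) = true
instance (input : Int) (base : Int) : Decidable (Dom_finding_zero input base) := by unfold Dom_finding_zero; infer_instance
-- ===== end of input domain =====

-- B keeps A's pyFactorization helper but replaces the set()+list.count scans by a one-pass
-- multiplicity dict and computes each prime's exponent in input! by Legendre's closed form
-- with a running minimum (objective: alternative algorithm, same cost).

-- ===== PORT A =====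
-- pyFactorization's while-loop, state (base, i, res); carried over Nat (exact: for base < 4 the
-- loop body never runs, and on nonnegative values Python's // and % agree with Nat division);
-- i = j + 2 since i starts at 2 and only increases.
def factLoop (b j : Nat) (res : List Int) : List Int × Nat :=
  if h : (j+2)*(j+2) ≤ b then
    if b % (j+2) = 0 then factLoop (b/(j+2)) j (res ++ [((j+2 : Nat) : Int)])
    else factLoop b (j+1) res
  else (res, b)
termination_by 2*b - j
decreasing_by
  · have h1 : j+2 ≤ b := le_trans (Nat.le_mul_of_pos_left (j+2) (by omega)) h
    have h2 : b/(j+2) < b := Nat.div_lt_self (by omega) (by omega)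
    omega
  · have h1 : j+2 ≤ b := le_trans (Nat.le_mul_of_pos_left (j+2) (by omega)) h
    omega

def pyFactorization (base : Int) : List Int :=
  let r := factLoop base.toNat 0 []
  -- Python's final 'if base > 1: res.append(base)' on the loop's leftover value
  if (r.2 : Int) > 1 then r.1 ++ [(r.2 : Int)] else r.1

-- A's inner 'while temp: temp //= factor; res += temp' loop, over Nat (exact for
-- temp ≥ 0 and factor ≥ 2, which Pre_ and pyFactorization guarantee); factor = j + 2.
def countLoop (t j : Nat) : Nat :=
  if h : t = 0 then 0 else t/(j+2) + countLoop (t/(j+2)) j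
termination_by t
decreasing_by exact Nat.div_lt_self (by omega) (by omega)

-- set(factors) is consumed only to build a dict looked up afterwards and to take min —
-- both independent of Python's set iteration order. data[f] is always present (the dict's
-- keys are exactly set(factors)), so getD models the [] lookup; min([]) raises ValueError
-- in Python (base < 2), excluded by Pre_, so .getD 0 there is never claimed about.
def finding_zero (input : Int) (base : Int) : Int :=
  let factors := pyFactorization base
  let ds : PySem.Set Int := PySem.Set.ofList factors
  let data : PySem.Dict Int Int :=
    ds.foldl (fun d f => d.insert f ((countLoop input.toNat (f.toNat - 2) : Nat) : Int)) PySem.Dict.empty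
  let lst := ds.map (fun f => PySem.Int.floordiv (data.getD f 0) ((factors.count f : Int)))
  (PySem.List.min? lst (fun x => x)).getD 0

-- ===== PORT B =====
-- B's 'while n: s += n % p; n //= p' digit-sum loop, over Nat (exact for n ≥ 0, p = j+2 ≥ 2).
def digitSum (t j : Nat) : Nat :=
  if h : t = 0 then 0 else t % (j+2) + digitSum (t/(j+2)) j
termination_by t
decreasing_by exact Nat.div_lt_self (by omega) (by omega)

-- B raises ValueError when the dict is empty (base < 2): excluded by Pre_, .getD 0 never claimed.
def finding_zero_alt (input : Int) (base : Int) : Int :=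
  let counts : PySem.Dict Int Int :=
    (pyFactorization base).foldl (fun d p => d.insert p (d.getD p 0 + 1)) PySem.Dict.empty
  let best := counts.items.foldl (fun best pm =>
    let s : Int := ((digitSum input.toNat (pm.1.toNat - 2) : Nat) : Int)
    let v := PySem.Int.floordiv (PySem.Int.floordiv (input - s) (pm.1 - 1)) pm.2
    match best with
    | none => some v
    | some bst => if v < bst then some v else some bst) none
  best.getD 0

-- ===== PRECONDITION & SPEC =====
-- A raises ValueError (min of an empty sequence) for base < 2, and its 'while temp' loop
-- never terminates for input < 0; Pre_ excludes exactly those inputs.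
def Pre_finding_zero (input : Int) (base : Int) : Prop := 0 ≤ input ∧ 2 ≤ base
instance (input : Int) (base : Int) : Decidable (Pre_finding_zero input base) := by
  unfold Pre_finding_zero; infer_instance
def pvWitness_finding_zero : Int × Int := (10, 10)

def Spec_finding_zero (input : Int) (base : Int) (out : Int) : Prop := out = finding_zero_alt input base
instance (input : Int) (base : Int) (out : Int) : Decidable (Spec_finding_zero input base out) := by unfold Spec_finding_zero; infer_instance

-- ===== CLAIM (what is proved, stated in full; the proofs are below) =====
def Claim_equal_finding_zero : Prop := ∀ (input : Int) (base : Int), Dom_finding_zero input base → Pre_finding_zero input base → Spec_finding_zero input base (finding_zero input base)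

-- ===== LEMMAS AND PROOFS =====

-- Legendre's identity for the two loops: (sum of quotients) * (p-1) + (digit sum) = t.
theorem countLoop_digitSum (j : Nat) : ∀ t : Nat, countLoop t j * (j+1) + digitSum t j = t := by
  intro t
  induction t using Nat.strong_induction_on with
  | _ t IH =>
    rw [countLoop, digitSum]
    by_cases h : t = 0
    · simp [h]
    · simp only [dif_neg h]
      have hd := Nat.div_add_mod t (j+2)
      have ih := IH (t/(j+2)) (Nat.div_lt_self (by omega) (by omega))
      calc (t/(j+2) + countLoop (t/(j+2)) j) * (j+1) + (t % (j+2) + digitSum (t/(j+2)) j)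
          = t/(j+2) * (j+1) + (countLoop (t/(j+2)) j * (j+1) + digitSum (t/(j+2)) j) + t % (j+2) := by ring
        _ = t/(j+2) * (j+1) + t/(j+2) + t % (j+2) := by rw [ih]
        _ = (j+2) * (t/(j+2)) + t % (j+2) := by ring
        _ = t := hd

-- every element of factorization is ≥ 2
theorem factLoop_mem (b j : Nat) (res : List Int) :
    ∀ x ∈ (factLoop b j res).1, x ∈ res ∨ (2:Int) ≤ x := by
  induction b, j, res using factLoop.induct with
  | case1 b j res h hdiv IH =>
    intro x hx
    rw [factLoop, dif_pos h, if_pos hdiv] at hx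
    rcases IH x hx with h' | h'
    · rcases List.mem_append.1 h' with h'' | h''
      · exact Or.inl h''
      · right
        have : x = ((j+2 : Nat) : Int) := by simpa using h''
        omega
    · exact Or.inr h'
  | case2 b j res h hdiv IH =>
    intro x hx
    rw [factLoop, dif_pos h, if_neg hdiv] at hx
    exact IH x hx
  | case3 b j res h =>
    intro x hx
    rw [factLoop, dif_neg h] at hx
    exact Or.inl hx

theorem factorization_mem (base : Int) : ∀ x ∈ pyFactorization base, (2:Int) ≤ x := by
  intro x hx
  unfold pyFactorization at hx
  simp only at hx
  split at hx
  · rename_i hgt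
    rcases List.mem_append.1 hx with h' | h'
    · rcases factLoop_mem _ _ _ x h' with h'' | h''
      · simp at h''
      · exact h''
    · have hxe : x = (((factLoop base.toNat 0 []).2 : Nat) : Int) := by simpa using h'
      omega
  · rcases factLoop_mem _ _ _ x hx with h'' | h''
    · simp at h''
    · exact h''

-- the running-min fold over values w x is Python's min of the mapped list
theorem foldlMin_some {α : Type} (w : α → Int) (t : List α) : ∀ x : Int,
    t.foldl (fun b e => match b with
      | none => some (w e)
      | some y => if w e < y then some (w e) else some y) (some x)
      = some ((t.map w).foldl min x) := by
  induction t with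
  | nil => intro x; rfl
  | cons v t IH =>
    intro x
    simp only [List.foldl_cons, List.map_cons]
    have hs : (if w v < x then some (w v) else some x) = some (min x (w v)) := by
      simp only [Int.min_def]
      split_ifs <;> first | rfl | (congr 1; omega)
    show List.foldl _ (if w v < x then some (w v) else some x) t = _
    rw [hs, IH]

theorem foldlMin_none {α : Type} (w : α → Int) (l : List α) :
    l.foldl (fun b e => match b with
      | none => some (w e)
      | some y => if w e < y then some (w e) else some y) none
      = PySem.List.min? (l.map w) (fun x => x) := by
  cases l with
  | nil => simp [PySem.List.min?]
  | cons x t =>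
    simp only [List.foldl_cons, List.map_cons]
    rw [foldlMin_some, PySem.List.min?_id_cons]

-- a running-min loop over values v x (x ∈ l), with v = w on l, is min? of l.map w
theorem foldl_min_map {α : Type} (l : List α) (v w : α → Int) (h : ∀ x ∈ l, v x = w x) :
    l.foldl (fun b x => match b with
      | none => some (v x)
      | some y => if v x < y then some (v x) else some y) none
      = PySem.List.min? (l.map w) (fun x => x) := by
  have h1 := PySem.List.foldl_congr_mem l
      (fun b x => match b with
        | none => some (v x)
        | some y => if v x < y then some (v x) else some y)
      (fun b x => match b with
        | none => some (w x)
        | some y => if w x < y then some (w x) else some y)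
      none
      (by intro acc x hx; simp only [h x hx])
  rw [h1]
  exact foldlMin_none w l

-- Legendre's closed form equals A's quotient-sum loop
theorem inner_eq (input f : Int) (h0 : 0 ≤ input) (hf : 2 ≤ f) :
    PySem.Int.floordiv (input - ((digitSum input.toNat (f.toNat - 2) : Nat) : Int)) (f - 1)
      = ((countLoop input.toNat (f.toNat - 2) : Nat) : Int) := by
  have hleg := countLoop_digitSum (f.toNat - 2) input.toNat
  have hcast := congrArg (Nat.cast : Nat → Int) hleg
  push_cast at hcast
  have hsub : input - ((digitSum input.toNat (f.toNat - 2) : Nat) : Int)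
      = ((countLoop input.toNat (f.toNat - 2) * (f.toNat - 2 + 1) : Nat) : Int) := by
    push_cast
    have hin : ((input.toNat : Nat) : Int) = input := Int.toNat_of_nonneg h0
    rw [hin] at hcast
    linarith
  rw [hsub]
  have hf1 : f - 1 = (((f.toNat - 2 + 1 : Nat)) : Int) := by omega
  rw [hf1, PySem.Int.floordiv_natCast]
  rw [Nat.mul_div_cancel _ (by omega)]

-- ===== VERDICT (by name: the statement is the Claim_ definition above) =====
theorem finding_zero_spec : Claim_equal_finding_zero := by
  intro input base hdom hpre
  obtain ⟨h0, hb⟩ := hpre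
  unfold Spec_finding_zero finding_zero finding_zero_alt
  simp only []
  set F := pyFactorization base with hF
  set ds := PySem.Set.ofList F with hds
  set c : Int → Int := fun f => ((countLoop input.toNat (f.toNat - 2) : Nat) : Int) with hc
  set g : Int → Int := fun f => PySem.Int.floordiv (c f) ((F.count f : Int)) with hg
  have hmem2 : ∀ f ∈ ds, (2:Int) ≤ f := by
    intro f hf
    exact factorization_mem base f ((PySem.Set.mem_ofList F f).1 hf)
  -- A's dict lookup gives c f on every f ∈ ds
  have hnodup : ds.Nodup := PySem.Set.nodup_ofList F
  have hitems := PySem.Dict.items_foldl_insert_fresh (l := ds) (k := fun a => a) (v := c)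
      (d := (PySem.Dict.empty : PySem.Dict Int Int))
      (by intro a _; rfl) (by simpa using hnodup)
  have hkn : ((ds.foldl (fun d f => d.insert f (c f)) PySem.Dict.empty)).keys.Nodup :=
    PySem.Dict.nodup_keys_foldl_insert ds (fun d f => c f) PySem.Dict.empty (by simp [PySem.Dict.empty, PySem.Dict.keys])
  have hdata : ∀ f ∈ ds, (ds.foldl (fun d f => d.insert f (c f)) PySem.Dict.empty).getD f 0 = c f := by
    intro f hf
    refine PySem.Dict.getD_of_mem_items _ ?_ hkn 0
    rw [hitems]
    simp only [List.mem_append, List.mem_map]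
    exact Or.inr ⟨f, hf, rfl⟩
  -- A's list is ds.map g
  have hA : ds.map (fun f => PySem.Int.floordiv
        ((ds.foldl (fun d f => d.insert f (c f)) PySem.Dict.empty).getD f 0) ((F.count f : Int)))
      = ds.map g := by
    refine List.map_congr_left ?_
    intro f hf
    rw [hdata f hf]
  rw [hA]
  -- B's dict is Counter(F); its items are ds paired with the counts
  rw [PySem.Dict.foldl_insert_getD_add_one_eq_counter F, PySem.Dict.items_counter F,
      List.foldl_map]
  -- B's running-min fold equals min? of ds.map g (pointwise by Legendre's identity)
  have hpt : ∀ f ∈ ds, PySem.Int.floordiv (PySem.Int.floordiv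
      (input - ((digitSum input.toNat (f.toNat - 2) : Nat) : Int)) (f - 1)) ((F.count f : Int)) = g f := by
    intro f hf
    rw [inner_eq input f h0 (hmem2 f hf)]
  exact congrArg (Option.getD · 0) (foldl_min_map ds
    (fun f => PySem.Int.floordiv (PySem.Int.floordiv
      (input - ((digitSum input.toNat (f.toNat - 2) : Nat) : Int)) (f - 1)) ((F.count f : Int)))
    g hpt).symm
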